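-- pv_equiv track=rewrite | github.com/mcguile/thesis | game/game_init.py | get_cell_neighbours
-- ===== SOURCE A (Python) =====
-- def get_shape_minmax_rowcol(r, c, num_rows, num_cols):
--     min_r = max(r - 1, 0)
--     max_r = min(r + 1, num_rows - 1)
--     min_c = max(c - 1, 0)
--     max_c = min(c + 1, num_cols - 1)
--     return min_r, max_r, min_c, max_c
--
-- def get_cell_neighbours(r, c, num_rows, num_cols):
--     neighbours = []
--     min_r, max_r, min_c, max_c = get_shape_minmax_rowcol(r, c, num_rows, num_cols)
--     for row in range(min_r, max_r + 1):
--         for col in range(min_c, max_c + 1):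
--             if col == c and row == r:
--                 continue
--             elif (c % 2 == 0) and ((col == c + 1 and row == r + 1) or (row == r + 1 and col == c - 1)):
--                 continue
--             elif (c % 2 == 1) and ((col == c - 1 and row == r - 1) or (row == r - 1 and col == c + 1)):
--                 continue
--             else:
--                 neighbours.append((row, col))
--     return neighbours
-- ===== SOURCE B (Python) =====
-- _EVEN_OFFSETS = ((-1, -1), (-1, 0), (-1, 1), (0, -1), (0, 1), (1, 0))
-- _ODD_OFFSETS = ((-1, 0), (0, -1), (0, 1), (1, -1), (1, 0), (1, 1))
--
-- def get_cell_neighbours(r, c, num_rows, num_cols):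
--     offsets = _EVEN_OFFSETS if c % 2 == 0 else _ODD_OFFSETS
--     return [(r + dr, c + dc) for dr, dc in offsets
--             if 0 <= r + dr < num_rows and 0 <= c + dc < num_cols]
-- ===== Notes on version B (the rewrite author's own statement) =====
-- stated objective: idiomatic
-- what changed: Replaces the clamped-bounding-box double loop with parity skip branches by two fixed six-entry (dr,dc) offset tables (even/odd column), selected by c % 2 and bounds-filtered in one comprehension.
import Mathlib
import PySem

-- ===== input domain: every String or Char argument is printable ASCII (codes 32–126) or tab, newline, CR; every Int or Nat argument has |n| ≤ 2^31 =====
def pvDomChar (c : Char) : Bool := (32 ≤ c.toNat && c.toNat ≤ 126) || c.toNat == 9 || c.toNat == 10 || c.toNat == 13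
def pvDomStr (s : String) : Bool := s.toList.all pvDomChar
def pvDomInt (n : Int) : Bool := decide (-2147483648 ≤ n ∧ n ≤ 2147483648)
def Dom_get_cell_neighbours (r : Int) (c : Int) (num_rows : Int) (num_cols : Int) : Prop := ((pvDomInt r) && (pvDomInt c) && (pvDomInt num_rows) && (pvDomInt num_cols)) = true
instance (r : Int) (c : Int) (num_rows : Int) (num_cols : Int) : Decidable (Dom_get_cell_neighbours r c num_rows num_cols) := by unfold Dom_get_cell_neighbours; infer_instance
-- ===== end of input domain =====

-- B replaces A's clamped-box double loop with parity skips by two fixed six-entry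
-- (dr,dc) offset tables selected by c % 2, bounds-filtered; idiomatic, not faster.

-- ===== PORT A =====
def get_shape_minmax_rowcol (r : Int) (c : Int) (num_rows : Int) (num_cols : Int) :
    Int × Int × Int × Int :=
  (max (r - 1) 0, min (r + 1) (num_rows - 1), max (c - 1) 0, min (c + 1) (num_cols - 1))

def get_cell_neighbours (r : Int) (c : Int) (num_rows : Int) (num_cols : Int) :
    List (Int × Int) :=
  match get_shape_minmax_rowcol r c num_rows num_cols with
  | (min_r, max_r, min_c, max_c) =>
    (PySem.List.pyRange min_r (max_r + 1) 1).foldl (fun neighbours row =>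
      (PySem.List.pyRange min_c (max_c + 1) 1).foldl (fun neighbours col =>
        if col == c && row == r then neighbours
        else if (PySem.Int.mod c 2 == 0) &&
            ((col == c + 1 && row == r + 1) || (row == r + 1 && col == c - 1)) then neighbours
        else if (PySem.Int.mod c 2 == 1) &&
            ((col == c - 1 && row == r - 1) || (row == r - 1 && col == c + 1)) then neighbours
        else neighbours ++ [(row, col)]) neighbours) []

-- ===== PORT B =====
def pvEvenOffsets : List (Int × Int) := [(-1, -1), (-1, 0), (-1, 1), (0, -1), (0, 1), (1, 0)]
def pvOddOffsets : List (Int × Int) := [(-1, 0), (0, -1), (0, 1), (1, -1), (1, 0), (1, 1)]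

def get_cell_neighbours_alt (r : Int) (c : Int) (num_rows : Int) (num_cols : Int) :
    List (Int × Int) :=
  ((if PySem.Int.mod c 2 == 0 then pvEvenOffsets else pvOddOffsets).filter (fun d =>
      decide (0 ≤ r + d.1) && decide (r + d.1 < num_rows) &&
      decide (0 ≤ c + d.2) && decide (c + d.2 < num_cols))).map
    (fun d => (r + d.1, c + d.2))

-- ===== PRECONDITION & SPEC =====
def Spec_get_cell_neighbours (r : Int) (c : Int) (num_rows : Int) (num_cols : Int) (out : List (Int × Int)) : Prop := out = get_cell_neighbours_alt r c num_rows num_cols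
instance (r : Int) (c : Int) (num_rows : Int) (num_cols : Int) (out : List (Int × Int)) : Decidable (Spec_get_cell_neighbours r c num_rows num_cols out) := by unfold Spec_get_cell_neighbours; infer_instance

-- ===== CLAIM (what is proved, stated in full; the proofs are below) =====
def Claim_equal_get_cell_neighbours : Prop := ∀ (r : Int) (c : Int) (num_rows : Int) (num_cols : Int), Dom_get_cell_neighbours r c num_rows num_cols → Spec_get_cell_neighbours r c num_rows num_cols (get_cell_neighbours r c num_rows num_cols)

-- ===== LEMMAS AND PROOFS =====

-- A's clamped range [max(x-1,0), min(x+1,n-1)] is the bounds-filter of {x-1, x, x+1}.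
theorem pv_range_clamp (x n : Int) :
    PySem.List.pyRange (max (x - 1) 0) (min (x + 1) (n - 1) + 1) 1
    = [x - 1, x, x + 1].filter (fun y => decide (0 ≤ y) && decide (y < n)) := by
  have hpw : List.Pairwise (· < ·)
      ([x - 1, x, x + 1].filter (fun y => decide (0 ≤ y) && decide (y < n))) :=
    List.Pairwise.filter _ (by simp [List.pairwise_cons] <;> omega)
  have hnd : ([x - 1, x, x + 1].filter (fun y => decide (0 ≤ y) && decide (y < n))).Nodup :=
    List.Nodup.filter _ (by simp [List.nodup_cons] <;> omega)
  have hperm : List.Perm (PySem.List.pyRange (max (x - 1) 0) (min (x + 1) (n - 1) + 1) 1)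
      ([x - 1, x, x + 1].filter (fun y => decide (0 ≤ y) && decide (y < n))) := by
    refine (List.perm_ext_iff_of_nodup (PySem.List.nodup_pyRange_one _ _) hnd).mpr ?_
    intro y
    simp only [PySem.List.mem_pyRange_one, List.mem_filter, List.mem_cons, List.not_mem_nil,
      or_false, Bool.and_eq_true, decide_eq_true_eq]
    omega
  exact List.Perm.eq_of_pairwise (fun a b _ _ h1 h2 => absurd h2 (lt_asymm h1))
    (PySem.List.pairwise_lt_pyRange_one _ _) hpw hperm

-- the keep-predicate of A's inner loop (the negation of its continue chain)
def pvKeep (r : Int) (c : Int) (row : Int) (col : Int) : Bool :=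
  !(col == c && row == r) &&
  !((PySem.Int.mod c 2 == 0) &&
      ((col == c + 1 && row == r + 1) || (row == r + 1 && col == c - 1))) &&
  !((PySem.Int.mod c 2 == 1) &&
      ((col == c - 1 && row == r - 1) || (row == r - 1 && col == c + 1)))

theorem pv_inner_fun (r : Int) (c : Int) (row : Int) :
    (fun (neighbours : List (Int × Int)) (col : Int) =>
        if col == c && row == r then neighbours
        else if (PySem.Int.mod c 2 == 0) &&
            ((col == c + 1 && row == r + 1) || (row == r + 1 && col == c - 1)) then neighbours
        else if (PySem.Int.mod c 2 == 1) &&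
            ((col == c - 1 && row == r - 1) || (row == r - 1 && col == c + 1)) then neighbours
        else neighbours ++ [(row, col)])
    = (fun neighbours col =>
        if pvKeep r c row col then neighbours ++ [(row, col)] else neighbours) := by
  funext neighbours col
  cases hA : (col == c && row == r) <;>
    cases hB : ((PySem.Int.mod c 2 == 0) &&
      ((col == c + 1 && row == r + 1) || (row == r + 1 && col == c - 1))) <;>
    cases hC : ((PySem.Int.mod c 2 == 1) &&
      ((col == c - 1 && row == r - 1) || (row == r - 1 && col == c + 1))) <;>
    simp only [pvKeep, hA, hB, hC] <;> simp

theorem pv_filter_comm {α : Type} (p q : α → Bool) (l : List α) :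
    (l.filter p).filter q = (l.filter q).filter p := by
  induction l with
  | nil => rfl
  | cons x l ih => cases hp : p x <;> cases hq : q x <;> simp [List.filter_cons, hp, hq, ih]

-- pull a bounds filter on the column out through `map (Prod.mk x)`
theorem pv_map_mk_filter (num_cols : Int) (x : Int) (L : List Int) :
    (L.filter (fun y => decide (0 ≤ y) && decide (y < num_cols))).map (Prod.mk x)
    = (L.map (Prod.mk x)).filter
        (fun q => decide (0 ≤ q.2) && decide (q.2 < num_cols)) := by
  induction L with
  | nil => rfl
  | cons y L ih =>
    cases h : (decide (0 ≤ y) && decide (y < num_cols)) <;>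
      simp [List.filter_cons, h, ih]

theorem pv_inner_push (r : Int) (c : Int) (num_cols : Int) (x : Int) (cols : List Int) :
    ((cols.filter (fun y => decide (0 ≤ y) && decide (y < num_cols))).filter
        (pvKeep r c x)).map (Prod.mk x)
    = ((cols.filter (pvKeep r c x)).map (Prod.mk x)).filter
        (fun q => decide (0 ≤ q.2) && decide (q.2 < num_cols)) := by
  rw [pv_filter_comm, pv_map_mk_filter]

-- a uniform filter commutes out of flatMap
theorem pv_flatMap_filter_snd (rows : List Int) (g : Int → List (Int × Int))
    (p : Int × Int → Bool) :
    rows.flatMap (fun x => (g x).filter p) = (rows.flatMap g).filter p := by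
  induction rows with
  | nil => rfl
  | cons x rows ih => simp [List.flatMap_cons, List.filter_append, ih]

-- a bounds filter on the row source becomes a filter on first components
theorem pv_filter_fst_flatMap (num_rows : Int) (rows : List Int) (h : Int → List Int) :
    (rows.filter (fun y => decide (0 ≤ y) && decide (y < num_rows))).flatMap
      (fun x => (h x).map (Prod.mk x))
    = (rows.flatMap (fun x => (h x).map (Prod.mk x))).filter
        (fun q => decide (0 ≤ q.1) && decide (q.1 < num_rows)) := by
  induction rows with
  | nil => rfl
  | cons x rows ih =>
    rw [List.filter_cons]
    cases hx : (decide (0 ≤ x) && decide (x < num_rows))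
    · have hnil : ((h x).map (Prod.mk x)).filter
          (fun q => decide (0 ≤ q.1) && decide (q.1 < num_rows)) = [] := by
        rw [List.filter_eq_nil_iff]
        intro q hq
        obtain ⟨y, _, rfl⟩ := List.mem_map.mp hq
        simp only [Prod.fst]
        simp [hx]
      simp [List.flatMap_cons, List.filter_append, hnil, ih]
    · have hself : ((h x).map (Prod.mk x)).filter
          (fun q => decide (0 ≤ q.1) && decide (q.1 < num_rows)) = (h x).map (Prod.mk x) := by
        rw [List.filter_eq_self]
        intro q hq
        obtain ⟨y, _, rfl⟩ := List.mem_map.mp hq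
        simpa using hx
      simp [List.flatMap_cons, List.filter_append, hself, ih]

-- pull B's bounds test out through `map (fun d => (r + d.1, c + d.2))`
theorem pv_map_f_filter (r : Int) (c : Int) (num_rows : Int) (num_cols : Int)
    (L : List (Int × Int)) :
    (L.filter (fun d => decide (0 ≤ r + d.1) && decide (r + d.1 < num_rows) &&
        decide (0 ≤ c + d.2) && decide (c + d.2 < num_cols))).map
      (fun d => (r + d.1, c + d.2))
    = (L.map (fun d => (r + d.1, c + d.2))).filter
        (fun q => decide (0 ≤ q.1) && decide (q.1 < num_rows) &&
          decide (0 ≤ q.2) && decide (q.2 < num_cols)) := by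
  induction L with
  | nil => rfl
  | cons d L ih =>
    cases h : (decide (0 ≤ r + d.1) && decide (r + d.1 < num_rows) &&
        decide (0 ≤ c + d.2) && decide (c + d.2 < num_cols)) <;>
      simp [List.filter_cons, h, ih]

theorem pv_filter_filter' {α : Type} (p q : α → Bool) (l : List α) :
    (l.filter p).filter q = l.filter (fun a => p a && q a) := by
  induction l with
  | nil => rfl
  | cons x l ih => cases hp : p x <;> cases hq : q x <;> simp [List.filter_cons, hp, hq, ih]

set_option maxHeartbeats 1000000 in
theorem get_cell_neighbours_eq (r : Int) (c : Int) (num_rows : Int) (num_cols : Int) :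
    get_cell_neighbours r c num_rows num_cols = get_cell_neighbours_alt r c num_rows num_cols := by
  have e1 : r + (-1 : Int) = r - 1 := by ring
  have e2 : c + (-1 : Int) = c - 1 := by ring
  have e3 : r + (0 : Int) = r := by ring
  have e4 : c + (0 : Int) = c := by ring
  have fc1 : ((c - 1 : Int) == c) = false := by rw [beq_eq_false_iff_ne]; omega
  have fc2 : ((c + 1 : Int) == c) = false := by rw [beq_eq_false_iff_ne]; omega
  have fc3 : ((c - 1 : Int) == c + 1) = false := by rw [beq_eq_false_iff_ne]; omega
  have fc4 : ((c : Int) == c + 1) = false := by rw [beq_eq_false_iff_ne]; omega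
  have fc5 : ((c : Int) == c - 1) = false := by rw [beq_eq_false_iff_ne]; omega
  have fc6 : ((c + 1 : Int) == c - 1) = false := by rw [beq_eq_false_iff_ne]; omega
  have fr1 : ((r - 1 : Int) == r) = false := by rw [beq_eq_false_iff_ne]; omega
  have fr2 : ((r + 1 : Int) == r) = false := by rw [beq_eq_false_iff_ne]; omega
  have fr3 : ((r - 1 : Int) == r + 1) = false := by rw [beq_eq_false_iff_ne]; omega
  have fr4 : ((r : Int) == r + 1) = false := by rw [beq_eq_false_iff_ne]; omega
  have fr5 : ((r : Int) == r - 1) = false := by rw [beq_eq_false_iff_ne]; omega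
  have fr6 : ((r + 1 : Int) == r - 1) = false := by rw [beq_eq_false_iff_ne]; omega
  unfold get_cell_neighbours get_cell_neighbours_alt get_shape_minmax_rowcol
  simp only [pv_inner_fun]
  simp only [PySem.List.foldl_append_if, PySem.List.foldl_append_eq_flatMap, List.nil_append]
  rw [pv_range_clamp r num_rows, pv_range_clamp c num_cols]
  simp only [pv_inner_push]
  rw [pv_flatMap_filter_snd, pv_filter_fst_flatMap]
  rcases PySem.Int.mod_two_eq c with hpar | hpar <;>
    simp only [hpar, beq_self_eq_true, eq_self_iff_true, if_true,
      show ((1 : Int) == 0) = false from rfl, Bool.false_eq_true, if_false] <;>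
    rw [pv_map_f_filter]
  · have hcand : ([r - 1, r, r + 1].flatMap
        (fun x => ([c - 1, c, c + 1].filter (pvKeep r c x)).map (Prod.mk x)))
        = pvEvenOffsets.map (fun d => (r + d.1, c + d.2)) := by
      simp only [pvKeep, hpar, pvEvenOffsets, pvOddOffsets,
        List.flatMap_cons, List.flatMap_nil, List.filter_cons, List.filter_nil,
        List.map_cons, List.map_nil, List.cons_append, List.nil_append, List.append_nil,
        fc1, fc2, fc3, fc4, fc5, fc6, fr1, fr2, fr3, fr4, fr5, fr6,
        show ((0 : Int) == 1) = false from rfl, show ((1 : Int) == 0) = false from rfl,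
        beq_self_eq_true, Bool.false_and, Bool.true_and, Bool.and_false, Bool.and_true,
        Bool.false_or, Bool.or_false, Bool.or_self, Bool.not_false, Bool.not_true,
        eq_self_iff_true, if_true, Bool.false_eq_true, if_false, e1, e2, e3, e4]
    rw [hcand, pv_filter_comm, pv_filter_filter']
    exact List.filter_congr (fun q _ => by
      cases h1 : decide (0 ≤ q.1) <;> cases h2 : decide (q.1 < num_rows) <;>
        cases h3 : decide (0 ≤ q.2) <;> cases h4 : decide (q.2 < num_cols) <;>
        simp [h1, h2, h3, h4])
  · have hcand : ([r - 1, r, r + 1].flatMap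
        (fun x => ([c - 1, c, c + 1].filter (pvKeep r c x)).map (Prod.mk x)))
        = pvOddOffsets.map (fun d => (r + d.1, c + d.2)) := by
      simp only [pvKeep, hpar, pvEvenOffsets, pvOddOffsets,
        List.flatMap_cons, List.flatMap_nil, List.filter_cons, List.filter_nil,
        List.map_cons, List.map_nil, List.cons_append, List.nil_append, List.append_nil,
        fc1, fc2, fc3, fc4, fc5, fc6, fr1, fr2, fr3, fr4, fr5, fr6,
        show ((0 : Int) == 1) = false from rfl, show ((1 : Int) == 0) = false from rfl,
        beq_self_eq_true, Bool.false_and, Bool.true_and, Bool.and_false, Bool.and_true,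
        Bool.false_or, Bool.or_false, Bool.or_self, Bool.not_false, Bool.not_true,
        eq_self_iff_true, if_true, Bool.false_eq_true, if_false, e1, e2, e3, e4]
    rw [hcand, pv_filter_comm, pv_filter_filter']
    exact List.filter_congr (fun q _ => by
      cases h1 : decide (0 ≤ q.1) <;> cases h2 : decide (q.1 < num_rows) <;>
        cases h3 : decide (0 ≤ q.2) <;> cases h4 : decide (q.2 < num_cols) <;>
        simp [h1, h2, h3, h4])

-- ===== VERDICT (by name: the statement is the Claim_ definition above) =====
theorem get_cell_neighbours_spec : Claim_equal_get_cell_neighbours := by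
  intro r c num_rows num_cols _
  unfold Spec_get_cell_neighbours
  exact get_cell_neighbours_eq r c num_rows num_cols
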